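-- pv_equiv track=rewrite | github.com/nazarov-yuriy/contests | yrrgpbqr/p0420/__init__.py | chars_types
-- ===== SOURCE A (Python) =====
-- def chars_types(password):
--     upper, lower, digit = 0, 0, 0
--     for char in password:
--         if '0' <= char <= '9':
--             digit += 1
--         elif 'a' <= char <= 'z':
--             lower += 1
--         elif 'A' <= char < 'Z':
--             upper += 1
--     return (1 if lower > 0 else 0) + (1 if upper > 0 else 0) + (1 if digit > 0 else 0)
-- ===== SOURCE B (Python) =====
-- def chars_types(password):
--     lower = any('a' <= c <= 'z' for c in password)
--     upper = any('A' <= c < 'Z' for c in password)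
--     digit = any('0' <= c <= '9' for c in password)
--     return lower + upper + digit
-- ===== Notes on version B (the rewrite author's own statement) =====
-- stated objective: idiomatic
-- what changed: Replaces the single counting pass with three independent short-circuiting any() presence scans (one per category, same range comparisons) summed as booleans.
import Mathlib
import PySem

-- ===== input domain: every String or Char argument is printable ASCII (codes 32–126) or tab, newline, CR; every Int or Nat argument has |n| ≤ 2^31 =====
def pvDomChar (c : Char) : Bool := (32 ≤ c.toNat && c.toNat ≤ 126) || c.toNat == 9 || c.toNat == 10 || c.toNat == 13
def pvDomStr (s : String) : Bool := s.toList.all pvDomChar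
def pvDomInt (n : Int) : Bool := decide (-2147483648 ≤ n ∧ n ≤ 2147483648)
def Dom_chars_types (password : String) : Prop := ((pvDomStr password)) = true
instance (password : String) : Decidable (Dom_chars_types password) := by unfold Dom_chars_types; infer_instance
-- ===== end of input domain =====

-- ===== PORT A =====
-- B replaces the single counting pass by three any() presence scans; same return value.
def chars_types (password : String) : Int :=
  let res := password.toList.foldl
    (fun (s : Int × Int × Int) (c : Char) =>
      let (upper, lower, digit) := s
      if '0' ≤ c ∧ c ≤ '9' then (upper, lower, digit + 1)
      else if 'a' ≤ c ∧ c ≤ 'z' then (upper, lower + 1, digit)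
      else if 'A' ≤ c ∧ c < 'Z' then (upper + 1, lower, digit)
      else (upper, lower, digit)) (0, 0, 0)
  (if res.2.1 > 0 then 1 else 0) + (if res.1 > 0 then 1 else 0) + (if res.2.2 > 0 then 1 else 0)

-- ===== PORT B =====
def chars_types_alt (password : String) : Int :=
  let lower := password.toList.any (fun c => decide ('a' ≤ c ∧ c ≤ 'z'))
  let upper := password.toList.any (fun c => decide ('A' ≤ c ∧ c < 'Z'))
  let digit := password.toList.any (fun c => decide ('0' ≤ c ∧ c ≤ '9'))
  (if lower then 1 else 0) + (if upper then 1 else 0) + (if digit then 1 else 0)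

-- ===== PRECONDITION & SPEC =====
def Spec_chars_types (password : String) (out : Int) : Prop := out = chars_types_alt password
instance (password : String) (out : Int) : Decidable (Spec_chars_types password out) := by unfold Spec_chars_types; infer_instance

-- ===== CLAIM (what is proved, stated in full; the proofs are below) =====
def Claim_equal_chars_types : Prop := ∀ (password : String), Dom_chars_types password → Spec_chars_types password (chars_types password)

-- ===== LEMMAS AND PROOFS =====

-- ===== VERDICT (by name: the statement is the Claim_ definition above) =====
lemma char_vals : '0'.val.toNat = 48 ∧ '9'.val.toNat = 57 ∧ 'A'.val.toNat = 65 ∧ 'Z'.val.toNat = 90 ∧ 'a'.val.toNat = 97 ∧ 'z'.val.toNat = 122 := by decide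

lemma fold_counts (cs : List Char) (u l d : Int) :
    cs.foldl
      (fun (s : Int × Int × Int) (c : Char) =>
        let (upper, lower, digit) := s
        if '0' ≤ c ∧ c ≤ '9' then (upper, lower, digit + 1)
        else if 'a' ≤ c ∧ c ≤ 'z' then (upper, lower + 1, digit)
        else if 'A' ≤ c ∧ c < 'Z' then (upper + 1, lower, digit)
        else (upper, lower, digit)) (u, l, d)
    = (u + cs.countP (fun c => decide ('A' ≤ c ∧ c < 'Z')),
       l + cs.countP (fun c => decide ('a' ≤ c ∧ c ≤ 'z')),
       d + cs.countP (fun c => decide ('0' ≤ c ∧ c ≤ '9'))) := by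
  induction cs generalizing u l d with
  | nil => simp
  | cons c cs ih =>
    obtain ⟨e1, e2, e3, e4, e5, e6⟩ := char_vals
    have hord : ('0' ≤ c ∧ c ≤ '9') → (¬('a' ≤ c ∧ c ≤ 'z') ∧ ¬('A' ≤ c ∧ c < 'Z')) := by
      simp only [Char.le_def, Char.lt_def, UInt32.le_iff_toNat_le, UInt32.lt_iff_toNat_lt,
        e1, e2, e3, e4, e5, e6]
      omega
    have hord2 : ('a' ≤ c ∧ c ≤ 'z') → ¬('A' ≤ c ∧ c < 'Z') := by
      simp only [Char.le_def, Char.lt_def, UInt32.le_iff_toNat_le, UInt32.lt_iff_toNat_lt,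
        e3, e4, e5, e6]
      omega
    simp only [List.foldl_cons]
    by_cases h1 : ('0' ≤ c ∧ c ≤ '9')
    · obtain ⟨hn1, hn2⟩ := hord h1
      rw [if_pos h1, ih]
      simp [h1, hn1, hn2, Prod.ext_iff]
      omega
    · rw [if_neg h1]
      by_cases h2 : ('a' ≤ c ∧ c ≤ 'z')
      · have hn := hord2 h2
        rw [if_pos h2, ih]
        simp [h1, h2, hn, Prod.ext_iff]
        omega
      · rw [if_neg h2]
        by_cases h3 : ('A' ≤ c ∧ c < 'Z')
        · rw [if_pos h3, ih]
          simp [h1, h2, h3, Prod.ext_iff]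
          omega
        · rw [if_neg h3, ih]
          simp [h1, h2, h3]

lemma any_iff_countP_pos (cs : List Char) (p : Char → Bool) :
    cs.any p = decide (0 < (cs.countP p : Int)) := by
  rcases h : cs.any p with _ | _
  · simp only [List.any_eq_false] at h
    have : cs.countP p = 0 := List.countP_eq_zero.mpr h
    simp [this]
  · simp only [List.any_eq_true] at h
    obtain ⟨x, hx, hp⟩ := h
    have h0 : 0 < cs.countP p := List.countP_pos_iff.mpr ⟨x, hx, hp⟩
    have h1 : (0 : Int) < (cs.countP p : Int) := by exact_mod_cast h0
    exact (decide_eq_true h1).symm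

theorem chars_types_spec : Claim_equal_chars_types := by
  intro password _
  unfold Spec_chars_types chars_types chars_types_alt
  rw [fold_counts]
  simp only [any_iff_countP_pos]
  norm_num
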